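-- pv_equiv track=rewrite | github.com/CodingPerson/OWET_code | utils/utils.py | getTypeAdd_FewNerd
-- ===== SOURCE A (Python) =====
-- import copy
--
-- def getTypeAdd_FewNerd(types):
--     layer = len(types)
--     types_add = copy.deepcopy(types)
--     while layer > 1:
--         for _type in types_add[layer].items():
--             st = _type[0].strip('-').split('-')
--             parent = '-'.join(st[:layer - 1])
--             types_add[layer - 1][parent] += _type[1]
--         layer -= 1
--     return types_add
-- ===== SOURCE B (Python) =====
-- import copy
--
-- def getTypeAdd_FewNerd(types):
--     n = len(types)
--     types_add = copy.deepcopy(types)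
--     for L in range(2, n + 1):
--         for key, count in types[L].items():
--             st = key.strip('-').split('-')
--             for k in range(1, L):
--                 types_add[k]['-'.join(st[:k])] += count
--     return types_add
-- ===== Notes on version B (the rewrite author's own statement) =====
-- stated objective: alternative
-- what changed: B scatters each layer's ORIGINAL counts directly to every strict ancestor (dash-joined key prefixes) in one upward pass, instead of A's downward layer-by-layer cascade of accumulated sums; Pre_ excludes inputs where A raises KeyError (missing layer or parent key), duplicate keys (impossible for real dicts), and keys with empty dash-separated components, where A's re-split of the joined parent collapses the empties while B keeps literal prefixes - both defensible on such malformed keys.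
import Mathlib
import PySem

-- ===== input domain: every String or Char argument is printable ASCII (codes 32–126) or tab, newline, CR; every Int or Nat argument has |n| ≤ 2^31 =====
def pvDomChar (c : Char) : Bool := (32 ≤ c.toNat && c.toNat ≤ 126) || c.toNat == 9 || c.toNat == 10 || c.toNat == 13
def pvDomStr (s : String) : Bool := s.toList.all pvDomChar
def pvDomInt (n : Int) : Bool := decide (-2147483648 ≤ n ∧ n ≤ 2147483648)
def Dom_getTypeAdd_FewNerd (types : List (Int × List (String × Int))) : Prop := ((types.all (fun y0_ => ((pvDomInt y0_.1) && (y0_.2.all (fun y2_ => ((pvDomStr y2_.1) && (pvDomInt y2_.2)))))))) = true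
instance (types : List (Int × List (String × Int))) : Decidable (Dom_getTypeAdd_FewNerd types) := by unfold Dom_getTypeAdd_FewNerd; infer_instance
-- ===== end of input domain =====

-- B scatters each entry's ORIGINAL count to all of its ancestors in one pass instead of A's
-- layer-by-layer cascade of accumulated sums; same return value on Pre_, no speed claim.

-- shared dict primitives (Python dict indexing on the association-list model; lookup/update = first match)
def dGet? {α : Type} (d : List (Int × α)) (k : Int) : Option α :=
  match d with
  | [] => none
  | (k', v) :: t => if k' = k then some v else dGet? t k

def dModify {α : Type} (d : List (Int × α)) (k : Int) (f : α → α) : List (Int × α) :=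
  match d with
  | [] => []
  | (k', v) :: t => if k' = k then (k', f v) :: t else (k', v) :: dModify t k f

-- inner-dict 'd[s] += c' (inside Pre_ the key is present; on a missing key Python raises, no claim there)
def sAdd (d : List (String × Int)) (s : String) (c : Int) : List (String × Int) :=
  match d with
  | [] => []
  | (s', v) :: t => if s' = s then (s', v + c) :: t else (s', v) :: sAdd t s c

-- key.strip('-').split('-')  (sep "-" ≠ "" so split? is always some; exact per PySem)
def splitKey (s : String) : List String :=
  (PySem.Str.split? (PySem.Str.stripChars s "-") "-").getD []

def joinKey (parts : List String) : String := PySem.Str.join "-" parts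

-- ===== PORT A =====
def stepA (acc : List (Int × List (String × Int))) (layer : Nat) : List (Int × List (String × Int)) :=
  ((dGet? acc (layer : Int)).getD []).foldl
    (fun a t =>
      let st := splitKey t.1
      let parent := joinKey (st.take (layer - 1))
      dModify a ((layer : Int) - 1) (fun d => sAdd d parent t.2))
    acc

def loopA (acc : List (Int × List (String × Int))) : Nat → List (Int × List (String × Int))
  | 0 => acc
  | 1 => acc
  | (l + 2) => loopA (stepA acc (l + 2)) (l + 1)

def getTypeAdd_FewNerd (types : List (Int × List (String × Int))) : List (Int × List (String × Int)) :=
  loopA types types.length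

-- ===== PORT B =====
def getTypeAdd_FewNerd_alt (types : List (Int × List (String × Int))) : List (Int × List (String × Int)) :=
  let n := types.length
  (PySem.List.pyRange 2 ((n : Int) + 1) 1).foldl
    (fun acc L =>
      ((dGet? types L).getD []).foldl
        (fun acc kc =>
          let st := splitKey kc.1
          (PySem.List.pyRange 1 L 1).foldl
            (fun acc k => dModify acc k (fun d => sAdd d (joinKey (st.take k.toNat)) kc.2))
            acc)
        acc)
    types

-- ===== PRECONDITION & SPEC =====
-- Pre_ excludes (a) inputs where A raises KeyError (a layer key 2..n or an immediate parent key
-- missing), (b) duplicate outer/inner keys, impossible for real Python dicts on this association-list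
-- model, and (c) keys whose joined ancestor prefix re-splits differently (empty '-'-separated
-- components), a malformed-key corner on which A's collapsing re-split and B's literal prefixes are
-- both defensible.
def Pre_getTypeAdd_FewNerd (types : List (Int × List (String × Int))) : Prop :=
  (types.map Prod.fst).Nodup ∧
  (∀ p ∈ types, (p.2.map Prod.fst).Nodup) ∧
  (∀ L ∈ PySem.List.pyRange 2 ((types.length : Int) + 1) 1,
      L ∈ types.map Prod.fst ∧ (L - 1) ∈ types.map Prod.fst) ∧
  (∀ p ∈ types, 2 ≤ p.1 → p.1 ≤ (types.length : Int) → ∀ q ∈ p.2,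
      ∀ r ∈ types, r.1 = p.1 - 1 →
        joinKey ((splitKey q.1).take (p.1 - 1).toNat) ∈ r.2.map Prod.fst ∧
        (3 ≤ p.1 → splitKey (joinKey ((splitKey q.1).take (p.1 - 1).toNat)) =
          (splitKey q.1).take (p.1 - 1).toNat))

instance (types : List (Int × List (String × Int))) : Decidable (Pre_getTypeAdd_FewNerd types) := by
  unfold Pre_getTypeAdd_FewNerd; infer_instance

def pvWitness_getTypeAdd_FewNerd : (List (Int × List (String × Int))) :=
  [(2, [("a-b", 3), ("a-c", 1)]), (1, [("a", 0)])]

def Spec_getTypeAdd_FewNerd (types : List (Int × List (String × Int))) (out : List (Int × List (String × Int))) : Prop := out = getTypeAdd_FewNerd_alt types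
instance (types : List (Int × List (String × Int))) (out : List (Int × List (String × Int))) : Decidable (Spec_getTypeAdd_FewNerd types out) := by unfold Spec_getTypeAdd_FewNerd; infer_instance

-- ===== CLAIM (what is proved, stated in full; the proofs are below) =====
def Claim_equal_getTypeAdd_FewNerd : Prop := ∀ (types : List (Int × List (String × Int))), Dom_getTypeAdd_FewNerd types → Pre_getTypeAdd_FewNerd types → Spec_getTypeAdd_FewNerd types (getTypeAdd_FewNerd types)

-- ===== LEMMAS AND PROOFS =====

theorem sumZ {α : Type} (l : List α) : (l.map (fun _ => (0:Int))).sum = 0 := by simp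

theorem sumAdd {α : Type} (l : List α) (f g : α → Int) :
    (l.map (fun x => f x + g x)).sum = (l.map f).sum + (l.map g).sum := by
  induction l with
  | nil => simp
  | cons a t ih => simp [ih]; ring

theorem sumSwap {α β : Type} (l : List α) (r : List β) (F : α → β → Int) :
    (l.map (fun a => (r.map (fun b => F a b)).sum)).sum
      = (r.map (fun b => (l.map (fun a => F a b)).sum)).sum := by
  induction l with
  | nil => simp
  | cons a t ih => simp only [List.map_cons, List.sum_cons, ih, sumAdd]

theorem iteSum {α : Type} (c : Prop) [Decidable c] (l : List α) (f : α → Int) :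
    (if c then (l.map f).sum else 0) = (l.map (fun x => if c then f x else 0)).sum := by
  by_cases h : c <;> simp [h]

theorem sumCongr {α : Type} (l : List α) (f g : α → Int) (h : ∀ x ∈ l, f x = g x) :
    (l.map f).sum = (l.map g).sum := by
  rw [List.map_congr_left h]

theorem sumEqZero {α : Type} (l : List α) (f : α → Int) (h : ∀ x ∈ l, f x = 0) :
    (l.map f).sum = 0 := by
  rw [sumCongr l f (fun _ => 0) h, sumZ]

theorem sumKeyIte {α : Type} [DecidableEq α] (d : List (α × Int)) (t : α) (F : α → Int)
    (hnd : (d.map Prod.fst).Nodup) (ht : t ∈ d.map Prod.fst) :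
    (d.map (fun q => if q.1 = t then F q.1 else 0)).sum = F t := by
  induction d with
  | nil => simp at ht
  | cons a l ih =>
    simp only [List.map_cons, List.sum_cons, List.nodup_cons] at hnd ⊢
    rcases hnd with ⟨ha, hl⟩
    by_cases h : a.1 = t
    · subst h
      rw [if_pos rfl, sumEqZero, add_zero]
      intro q hq
      rw [if_neg]
      intro he; exact ha (he ▸ List.mem_map_of_mem hq)
    · rw [if_neg h, zero_add]
      apply ih hl
      simp only [List.map_cons, List.mem_cons] at ht
      tauto


theorem sumMemIte {α : Type} [DecidableEq α] (l : List α) (t : α) (F : α → Int)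
    (hnd : l.Nodup) (ht : t ∈ l) :
    (l.map (fun k => if t = k then F k else 0)).sum = F t := by
  induction l with
  | nil => simp at ht
  | cons x l ih =>
    simp only [List.map_cons, List.sum_cons, List.nodup_cons] at hnd ⊢
    by_cases hx : t = x
    · subst hx
      rw [if_pos rfl, sumEqZero, add_zero]
      intro q hq; rw [if_neg]; intro he; exact hnd.1 (he ▸ hq)
    · rw [if_neg hx, zero_add]
      refine ih hnd.2 ?_
      rcases List.mem_cons.1 ht with h1 | h1
      · exact absurd h1 hx
      · exact h1

theorem sumIdxIte (a b K : Int) (f : Int → Int) :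
    ((PySem.List.pyRange a b 1).map (fun k => if K = k then f k else 0)).sum
      = if a ≤ K ∧ K < b then f K else 0 := by
  by_cases h : a ≤ K ∧ K < b
  · rw [if_pos h]
    exact sumMemIte _ K f (PySem.List.nodup_pyRange_one a b) ((PySem.List.mem_pyRange_one).2 h)
  · rw [if_neg h]
    apply sumEqZero
    intro k hk
    rw [if_neg]
    intro he
    exact h (he ▸ (PySem.List.mem_pyRange_one).1 hk)
def vmap (f : Int → String → Int) (t : List (Int × List (String × Int))) : List (Int × List (String × Int)) :=
  t.map (fun p => (p.1, p.2.map (fun q => (q.1, q.2 + f p.1 q.1))))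

theorem vmap_zero (t : List (Int × List (String × Int))) : vmap (fun _ _ => 0) t = t := by
  simp [vmap]

theorem vmap_congr {f g : Int → String → Int} (t : List (Int × List (String × Int)))
    (h : ∀ k s, f k s = g k s) : vmap f t = vmap g t := by
  simp only [vmap]; apply List.map_congr_left; intro p _; simp [h]

theorem map_fst_vmap (f : Int → String → Int) (t : List (Int × List (String × Int))) :
    (vmap f t).map Prod.fst = t.map Prod.fst := by
  simp [vmap]

theorem dGet?_vmap (f : Int → String → Int) (t : List (Int × List (String × Int))) (k : Int) :
    dGet? (vmap f t) k = (dGet? t k).map (fun d => d.map (fun q => (q.1, q.2 + f k q.1))) := by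
  induction t with
  | nil => simp [vmap, dGet?]
  | cons p l ih =>
    simp only [vmap, List.map_cons, dGet?] at ih ⊢
    by_cases h : p.1 = k
    · subst h; simp
    · simp [h, ih]

theorem dGet?_mem {t : List (Int × List (String × Int))} {k : Int} {v : List (String × Int)}
    (h : dGet? t k = some v) : (k, v) ∈ t := by
  induction t with
  | nil => simp [dGet?] at h
  | cons p l ih =>
    simp only [dGet?] at h
    by_cases hp : p.1 = k
    · rw [if_pos hp] at h
      apply List.mem_cons.2
      left
      cases p
      simp_all
    · rw [if_neg hp] at h
      exact List.mem_cons_of_mem _ (ih h)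

theorem map_pair_eq_self {α : Type} [DecidableEq α] (d : List (α × Int)) (s : α) (c : Int)
    (h : s ∉ d.map Prod.fst) :
    d.map (fun q => (q.1, q.2 + if q.1 = s then c else 0)) = d := by
  induction d with
  | nil => rfl
  | cons a l ih =>
    simp only [List.map_cons, List.mem_cons, not_or] at h ⊢
    rw [if_neg (fun he => h.1 he.symm), add_zero, ih h.2]

theorem sAdd_eq_map (d : List (String × Int)) (s : String) (c : Int)
    (hnd : (d.map Prod.fst).Nodup) :
    sAdd d s c = d.map (fun q => (q.1, q.2 + if q.1 = s then c else 0)) := by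
  induction d with
  | nil => rfl
  | cons a l ih =>
    simp only [List.map_cons, List.nodup_cons] at hnd ⊢
    simp only [sAdd]
    by_cases h : a.1 = s
    · rw [if_pos h, if_pos h]
      subst h
      rw [map_pair_eq_self _ _ _ hnd.1]
    · rw [if_neg h, if_neg h, add_zero, ih hnd.2]

theorem dModify_eq_map (t : List (Int × List (String × Int))) (k : Int)
    (f : List (String × Int) → List (String × Int)) (hnd : (t.map Prod.fst).Nodup) :
    dModify t k f = t.map (fun p => (p.1, if p.1 = k then f p.2 else p.2)) := by
  induction t with
  | nil => rfl
  | cons a l ih =>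
    simp only [List.map_cons, List.nodup_cons] at hnd ⊢
    simp only [dModify]
    by_cases h : a.1 = k
    · rw [if_pos h, if_pos h]
      subst h
      congr 1
      have : ∀ p ∈ l, (p.1, if p.1 = a.1 then f p.2 else p.2) = p := by
        intro p hp
        rw [if_neg, ]
        intro he; exact hnd.1 (he ▸ List.mem_map_of_mem hp)
      rw [List.map_congr_left this, List.map_id']
    · rw [if_neg h, if_neg h, ih hnd.2]

theorem op_vmap (t : List (Int × List (String × Int))) (g : Int → String → Int)
    (k : Int) (s : String) (c : Int)
    (hnd : (t.map Prod.fst).Nodup) (hin : ∀ p ∈ t, (p.2.map Prod.fst).Nodup) :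
    dModify (vmap g t) k (fun d => sAdd d s c)
      = vmap (fun K S => g K S + if K = k then (if S = s then c else 0) else 0) t := by
  rw [dModify_eq_map _ _ _ (by rw [map_fst_vmap]; exact hnd)]
  simp only [vmap, List.map_map]
  apply List.map_congr_left
  intro p hp
  simp only [Function.comp]
  by_cases h : p.1 = k
  · simp only [if_pos h]
    rw [sAdd_eq_map _ s c (by rw [List.map_map]; exact hin p hp)]
    simp only [List.map_map]
    refine congrArg _ ?_
    apply List.map_congr_left
    intro q _
    simp only [Function.comp]
    rw [add_assoc]
  · simp only [if_neg h, add_zero]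

theorem foldl_delta {α : Type} (l : List α)
    (step : List (Int × List (String × Int)) → α → List (Int × List (String × Int)))
    (δ : α → Int → String → Int) (t : List (Int × List (String × Int)))
    (h : ∀ (g : Int → String → Int) (x : α), x ∈ l →
      step (vmap g t) x = vmap (fun K S => g K S + δ x K S) t) :
    ∀ g, l.foldl step (vmap g t)
      = vmap (fun K S => g K S + (l.map (fun x => δ x K S)).sum) t := by
  induction l with
  | nil => intro g; simp only [List.foldl_nil, List.map_nil, List.sum_nil]
           exact (vmap_congr t (by intro k s; rw [add_zero])).symm
  | cons x r ih =>
    intro g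
    simp only [List.foldl_cons]
    rw [h g x (List.mem_cons_self), ih (fun g' x hx => h g' x (List.mem_cons_of_mem _ hx))]
    apply vmap_congr
    intro K S
    simp only [List.map_cons, List.sum_cons]
    ring

def srcSum (d : List (String × Int)) (k : Nat) (s : String) : Int :=
  (d.map (fun q => if s = joinKey ((splitKey q.1).take k) then q.2 else 0)).sum

def G (t : List (Int × List (String × Int))) (m k : Int) (s : String) : Int :=
  ((PySem.List.pyRange (m + 1) ((t.length : Int) + 1) 1).map
    (fun L => if m ≤ k ∧ k ≤ L - 1 then srcSum ((dGet? t L).getD []) k.toNat s else 0)).sum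

theorem B_char (t : List (Int × List (String × Int)))
    (hnd : (t.map Prod.fst).Nodup) (hin : ∀ p ∈ t, (p.2.map Prod.fst).Nodup) :
    getTypeAdd_FewNerd_alt t = vmap (G t 1) t := by
  simp only [getTypeAdd_FewNerd_alt]
  rw [show t = vmap (fun _ _ => 0) t from (vmap_zero t).symm]
  rw [foldl_delta _ _
    (fun L K S => if 1 ≤ K ∧ K < L then srcSum ((dGet? t L).getD []) K.toNat S else 0) t ?hstep]
  case hstep =>
    intro g L _
    -- middle fold over the entries of layer L
    rw [foldl_delta _ _
      (fun kc K S => if 1 ≤ K ∧ K < L then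
        (if S = joinKey ((splitKey kc.1).take K.toNat) then kc.2 else 0) else 0) t ?hmid]
    case hmid =>
      intro g' kc _
      -- inner fold over k ∈ range(1, L)
      rw [foldl_delta _ _
        (fun k K S => if K = k then
          (if S = joinKey ((splitKey kc.1).take k.toNat) then kc.2 else 0) else 0) t ?hop]
      case hop =>
        intro g'' k _
        exact op_vmap t g'' k (joinKey ((splitKey kc.1).take k.toNat)) kc.2 hnd hin
      apply vmap_congr
      intro K S
      rw [sumIdxIte 1 L K (fun k => if S = joinKey ((splitKey kc.1).take k.toNat) then kc.2 else 0)]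
    apply vmap_congr
    intro K S
    refine congrArg _ ?_
    rw [← iteSum]
    simp only [vmap_zero]
    rfl
  simp only [vmap_zero]
  apply vmap_congr
  intro K S
  rw [zero_add]
  simp only [G]
  norm_num

theorem chain (t : List (Int × List (String × Int)))
    (h4 : ∀ p ∈ t, 2 ≤ p.1 → p.1 ≤ (t.length : Int) → ∀ q ∈ p.2,
      joinKey ((splitKey q.1).take (p.1 - 1).toNat) ∈ ((dGet? t (p.1 - 1)).getD []).map Prod.fst ∧
      (3 ≤ p.1 → splitKey (joinKey ((splitKey q.1).take (p.1 - 1).toNat)) =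
        (splitKey q.1).take (p.1 - 1).toNat)) :
    ∀ (i j L : Nat), 1 ≤ j → j + 1 + i = L → L ≤ t.length →
      ∀ u ∈ ((dGet? t (L : Int)).getD []).map Prod.fst,
        joinKey ((splitKey u).take j) ∈ ((dGet? t (j : Int)).getD []).map Prod.fst ∧
        (2 ≤ j → splitKey (joinKey ((splitKey u).take j)) = (splitKey u).take j) := by
  intro i
  induction i with
  | zero =>
    intro j L hj hL hLn u hu
    rcases List.mem_map.1 hu with ⟨q, hq, hq1⟩
    cases hdg : dGet? t (L : Int) with
    | none => rw [hdg] at hu; simp at hu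
    | some d =>
      rw [hdg] at hq
      have hmem := dGet?_mem hdg
      have h2L : (2 : Int) ≤ ((L : Nat) : Int) := by omega
      have hLn' : ((L : Nat) : Int) ≤ (t.length : Int) := by exact_mod_cast hLn
      have := h4 ((L : Int), d) hmem h2L hLn' q hq
      have hLj : (((L : Int)) - 1).toNat = j := by omega
      rw [hLj, hq1] at this
      refine ⟨?_, ?_⟩
      · have := this.1
        rwa [show ((L : Int) - 1) = (j : Int) by omega] at this
      · intro h2j
        exact this.2 (by omega)
  | succ i ih =>
    intro j L hj hL hLn u hu
    have hIH := ih (j + 1) L (by omega) (by omega) hLn u hu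
    have hco : splitKey (joinKey ((splitKey u).take (j + 1))) = (splitKey u).take (j + 1) :=
      hIH.2 (by omega)
    rcases List.mem_map.1 hIH.1 with ⟨q, hq, hq1⟩
    cases hdg : dGet? t ((j + 1 : Nat) : Int) with
    | none => rw [hdg] at hIH; simp at hIH
    | some d =>
      rw [hdg] at hq
      have hmem := dGet?_mem hdg
      have := h4 (((j + 1 : Nat) : Int), d) hmem (by push_cast; omega)
        (by push_cast; omega) q hq
      have hj1 : ((((j + 1 : Nat) : Int)) - 1).toNat = j := by omega
      rw [hj1, hq1, hco, List.take_take, show min j (j + 1) = j by omega] at this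
      refine ⟨?_, ?_⟩
      · have h1 := this.1
        rwa [show (((j + 1 : Nat) : Int) - 1) = (j : Int) by omega] at h1
      · intro h2j
        exact this.2 (by push_cast; omega)

theorem iteAdd (c : Prop) [Decidable c] (a b : Int) :
    (if c then a + b else 0) = (if c then a else 0) + (if c then b else 0) := by
  by_cases h : c <;> simp [h]

theorem hinD (t : List (Int × List (String × Int)))
    (hin : ∀ p ∈ t, (p.2.map Prod.fst).Nodup) (k : Int) :
    (((dGet? t k).getD []).map Prod.fst).Nodup := by
  cases hdg : dGet? t k with
  | none => simp
  | some d => exact hin (k, d) (dGet?_mem hdg)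

theorem Gstep (t : List (Int × List (String × Int)))
    (hin : ∀ p ∈ t, (p.2.map Prod.fst).Nodup)
    (h4 : ∀ p ∈ t, 2 ≤ p.1 → p.1 ≤ (t.length : Int) → ∀ q ∈ p.2,
      joinKey ((splitKey q.1).take (p.1 - 1).toNat) ∈ ((dGet? t (p.1 - 1)).getD []).map Prod.fst ∧
      (3 ≤ p.1 → splitKey (joinKey ((splitKey q.1).take (p.1 - 1).toNat)) =
        (splitKey q.1).take (p.1 - 1).toNat))
    (M K : Int) (S : String) (h2 : 2 ≤ M) (hMn : M ≤ (t.length : Int)) :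
    G t M K S +
      ((((dGet? t M).getD []).map (fun q => if K = M - 1 then
        (if S = joinKey ((splitKey q.1).take (M - 1).toNat) then q.2 + G t M M q.1 else 0)
        else 0)).sum)
      = G t (M - 1) K S := by
  have hGm1 : G t (M - 1) K S
      = (if M - 1 ≤ K ∧ K ≤ M - 1 then srcSum ((dGet? t M).getD []) K.toNat S else 0)
        + ((PySem.List.pyRange (M + 1) ((t.length : Int) + 1) 1).map
            (fun L => if M - 1 ≤ K ∧ K ≤ L - 1 then srcSum ((dGet? t L).getD []) K.toNat S else 0)).sum := by
    simp only [G]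
    rw [show M - 1 + 1 = M from by ring, PySem.List.pyRange_one_cons (by omega)]
    simp only [List.map_cons, List.sum_cons]
  by_cases hK : K = M - 1
  · have hKt : K.toNat = (M - 1).toNat := by omega
    have hG0 : G t M K S = 0 := by
      apply sumEqZero
      intro L _
      rw [if_neg]
      intro hc
      omega
    rw [hG0, zero_add, hGm1, if_pos (by omega), hKt]
    have hsplit : (((dGet? t M).getD []).map (fun q => if K = M - 1 then
        (if S = joinKey ((splitKey q.1).take (M - 1).toNat) then q.2 + G t M M q.1 else 0)
        else 0)).sum
        = srcSum ((dGet? t M).getD []) (M - 1).toNat S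
          + (((dGet? t M).getD []).map (fun q =>
              if S = joinKey ((splitKey q.1).take (M - 1).toNat) then G t M M q.1 else 0)).sum := by
      simp only [srcSum]
      rw [← sumAdd]
      apply sumCongr
      intro q _
      rw [if_pos hK, iteAdd]
    rw [hsplit]
    refine congrArg _ ?_
    have hGMM : ∀ q : String × Int,
        G t M M q.1 = ((PySem.List.pyRange (M + 1) ((t.length : Int) + 1) 1).map
          (fun L => srcSum ((dGet? t L).getD []) M.toNat q.1)).sum := by
      intro q
      apply sumCongr
      intro L hL
      rw [if_pos]
      have := (PySem.List.mem_pyRange_one).1 hL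
      omega
    calc (((dGet? t M).getD []).map (fun q =>
            if S = joinKey ((splitKey q.1).take (M - 1).toNat) then G t M M q.1 else 0)).sum
        = (((dGet? t M).getD []).map (fun q =>
            ((PySem.List.pyRange (M + 1) ((t.length : Int) + 1) 1).map
              (fun L => if S = joinKey ((splitKey q.1).take (M - 1).toNat)
                then srcSum ((dGet? t L).getD []) M.toNat q.1 else 0)).sum)).sum := by
          apply sumCongr
          intro q _
          rw [← iteSum, ← hGMM q]
      _ = ((PySem.List.pyRange (M + 1) ((t.length : Int) + 1) 1).map
            (fun L => (((dGet? t M).getD []).map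
              (fun q => if S = joinKey ((splitKey q.1).take (M - 1).toNat)
                then srcSum ((dGet? t L).getD []) M.toNat q.1 else 0)).sum)).sum := by
          rw [sumSwap]
      _ = ((PySem.List.pyRange (M + 1) ((t.length : Int) + 1) 1).map
            (fun L => srcSum ((dGet? t L).getD []) (M - 1).toNat S)).sum := by
          apply sumCongr
          intro L hL
          have hLr := (PySem.List.mem_pyRange_one).1 hL
          calc (((dGet? t M).getD []).map
                  (fun q => if S = joinKey ((splitKey q.1).take (M - 1).toNat)
                    then srcSum ((dGet? t L).getD []) M.toNat q.1 else 0)).sum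
              = (((dGet? t M).getD []).map (fun q =>
                  (((dGet? t L).getD []).map (fun u =>
                    if q.1 = joinKey ((splitKey u.1).take M.toNat) then
                      (if S = joinKey ((splitKey q.1).take (M - 1).toNat) then u.2 else 0)
                    else 0)).sum)).sum := by
                apply sumCongr
                intro q _
                simp only [srcSum]
                by_cases hS : S = joinKey ((splitKey q.1).take (M - 1).toNat)
                · rw [if_pos hS]
                  apply sumCongr
                  intro u _
                  rw [if_pos hS]
                · rw [if_neg hS]
                  symm
                  apply sumEqZero
                  intro u _
                  by_cases hq : q.1 = joinKey ((splitKey u.1).take M.toNat)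
                  · rw [if_pos hq, if_neg hS]
                  · rw [if_neg hq]
            _ = (((dGet? t L).getD []).map (fun u =>
                  (((dGet? t M).getD []).map (fun q =>
                    if q.1 = joinKey ((splitKey u.1).take M.toNat) then
                      (if S = joinKey ((splitKey q.1).take (M - 1).toNat) then u.2 else 0)
                    else 0)).sum)).sum := by
                rw [sumSwap]
            _ = (((dGet? t L).getD []).map (fun u =>
                  if S = joinKey ((splitKey u.1).take (M - 1).toNat) then u.2 else 0)).sum := by
                apply sumCongr
                intro u hu
                have hch := chain t h4 (L.toNat - M.toNat - 1) M.toNat L.toNat (by omega)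
                  (by omega) (by omega) u.1
                  (by rw [show ((L.toNat : Nat) : Int) = L by omega]
                      exact List.mem_map_of_mem hu)
                rw [show ((M.toNat : Nat) : Int) = M by omega] at hch
                rw [sumKeyIte ((dGet? t M).getD [])
                  (joinKey ((splitKey u.1).take M.toNat))
                  (fun x => if S = joinKey ((splitKey x).take (M - 1).toNat) then u.2 else 0)
                  (hinD t hin M) hch.1]
                rw [hch.2 (by omega), List.take_take]
                rw [show min (M - 1).toNat M.toNat = (M - 1).toNat from by omega]
            _ = srcSum ((dGet? t L).getD []) (M - 1).toNat S := rfl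
      _ = ((PySem.List.pyRange (M + 1) ((t.length : Int) + 1) 1).map
            (fun L => if M - 1 ≤ K ∧ K ≤ L - 1 then
              srcSum ((dGet? t L).getD []) (M - 1).toNat S else 0)).sum := by
          apply sumCongr
          intro L hL
          have hLr := (PySem.List.mem_pyRange_one).1 hL
          rw [if_pos ⟨by omega, by omega⟩]
  · rw [sumEqZero _ _ (by intro q _; rw [if_neg hK]), add_zero, hGm1,
      if_neg (by intro hc; exact hK (by omega)), zero_add]
    simp only [G]
    apply sumCongr
    intro L _
    refine if_congr ?_ rfl rfl
    constructor
    · intro h; exact ⟨by omega, h.2⟩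
    · intro h; exact ⟨by omega, h.2⟩

theorem optMapGetD (o : Option (List (String × Int))) (f : (String × Int) → (String × Int)) :
    (o.map (fun d => d.map f)).getD [] = (o.getD []).map f := by
  cases o <;> rfl

theorem stepA_char (t : List (Int × List (String × Int)))
    (hnd : (t.map Prod.fst).Nodup) (hin : ∀ p ∈ t, (p.2.map Prod.fst).Nodup)
    (h4 : ∀ p ∈ t, 2 ≤ p.1 → p.1 ≤ (t.length : Int) → ∀ q ∈ p.2,
      joinKey ((splitKey q.1).take (p.1 - 1).toNat) ∈ ((dGet? t (p.1 - 1)).getD []).map Prod.fst ∧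
      (3 ≤ p.1 → splitKey (joinKey ((splitKey q.1).take (p.1 - 1).toNat)) =
        (splitKey q.1).take (p.1 - 1).toNat))
    (M : Nat) (h2 : 2 ≤ M) (hMn : M ≤ t.length) :
    stepA (vmap (G t (M : Int)) t) M = vmap (G t ((M : Int) - 1)) t := by
  simp only [stepA]
  rw [dGet?_vmap, optMapGetD]
  rw [foldl_delta (((dGet? t (M : Int)).getD []).map (fun q => (q.1, q.2 + G t (M : Int) (M : Int) q.1)))
    _ (fun x K S => if K = (M : Int) - 1 then
        (if S = joinKey ((splitKey x.1).take (M - 1)) then x.2 else 0) else 0) t ?hop]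
  case hop =>
    intro g x _
    exact op_vmap t g ((M : Int) - 1) (joinKey ((splitKey x.1).take (M - 1))) x.2 hnd hin
  apply vmap_congr
  intro K S
  rw [List.map_map]
  have hg := Gstep t hin h4 (M : Int) K S (by exact_mod_cast h2) (by exact_mod_cast hMn)
  rw [show ((M : Int) - 1).toNat = M - 1 from by omega] at hg
  rw [← hg]
  rfl

theorem G_hi (t : List (Int × List (String × Int))) (m : Int)
    (hm : (t.length : Int) ≤ m) (k : Int) (s : String) : G t m k s = 0 := by
  simp only [G]
  rw [PySem.List.pyRange_one_eq_nil (by omega)]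
  rfl

theorem loop_inv (t : List (Int × List (String × Int)))
    (hnd : (t.map Prod.fst).Nodup) (hin : ∀ p ∈ t, (p.2.map Prod.fst).Nodup)
    (h4 : ∀ p ∈ t, 2 ≤ p.1 → p.1 ≤ (t.length : Int) → ∀ q ∈ p.2,
      joinKey ((splitKey q.1).take (p.1 - 1).toNat) ∈ ((dGet? t (p.1 - 1)).getD []).map Prod.fst ∧
      (3 ≤ p.1 → splitKey (joinKey ((splitKey q.1).take (p.1 - 1).toNat)) =
        (splitKey q.1).take (p.1 - 1).toNat)) :
    ∀ m : Nat, 1 ≤ m → m ≤ t.length → loopA (vmap (G t (m : Int)) t) m = vmap (G t 1) t := by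
  intro m
  induction m with
  | zero => intro h; omega
  | succ l ih =>
    intro _ hml
    match l, ih with
    | 0, _ => simp only [loopA]; norm_num
    | (k + 1), ih =>
      simp only [loopA]
      rw [stepA_char t hnd hin h4 (k + 2) (by omega) (by omega)]
      have hc : ((k + 2 : Nat) : Int) - 1 = ((k + 1 : Nat) : Int) := by push_cast; ring
      rw [hc]
      exact ih (by omega) (by omega)

theorem A_char (t : List (Int × List (String × Int)))
    (hnd : (t.map Prod.fst).Nodup) (hin : ∀ p ∈ t, (p.2.map Prod.fst).Nodup)
    (h4 : ∀ p ∈ t, 2 ≤ p.1 → p.1 ≤ (t.length : Int) → ∀ q ∈ p.2,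
      joinKey ((splitKey q.1).take (p.1 - 1).toNat) ∈ ((dGet? t (p.1 - 1)).getD []).map Prod.fst ∧
      (3 ≤ p.1 → splitKey (joinKey ((splitKey q.1).take (p.1 - 1).toNat)) =
        (splitKey q.1).take (p.1 - 1).toNat)) :
    getTypeAdd_FewNerd t = vmap (G t 1) t := by
  simp only [getTypeAdd_FewNerd]
  cases hn : t.length with
  | zero =>
    have : G t 1 = fun _ _ => (0 : Int) := by
      funext k s
      exact G_hi t 1 (by omega) k s
    rw [show loopA t 0 = t from rfl, this, vmap_zero]
  | succ l =>
    have hstart : t = vmap (G t ((l + 1 : Nat) : Int)) t := by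
      rw [show G t ((l + 1 : Nat) : Int) = fun _ _ => (0 : Int) from by
        funext k s; exact G_hi t _ (by omega) k s, vmap_zero]
    conv_lhs => rw [hstart]
    exact loop_inv t hnd hin h4 (l + 1) (by omega) (by omega)

theorem dGet?_isSome_of_mem_keys (t : List (Int × List (String × Int))) (k : Int)
    (h : k ∈ t.map Prod.fst) : (dGet? t k).isSome = true := by
  induction t with
  | nil => simp at h
  | cons p l ih =>
    simp only [List.map_cons, List.mem_cons] at h
    simp only [dGet?]
    by_cases hp : p.1 = k
    · rw [if_pos hp]; rfl
    · rw [if_neg hp]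
      exact ih (h.resolve_left (fun he => hp he.symm))

-- ===== VERDICT (by name: the statement is the Claim_ definition above) =====
theorem getTypeAdd_FewNerd_spec : Claim_equal_getTypeAdd_FewNerd := by
  intro t _ hPre
  obtain ⟨hnd, hin, h3, h4m⟩ := hPre
  have h4 : ∀ p ∈ t, 2 ≤ p.1 → p.1 ≤ (t.length : Int) → ∀ q ∈ p.2,
      joinKey ((splitKey q.1).take (p.1 - 1).toNat) ∈ ((dGet? t (p.1 - 1)).getD []).map Prod.fst ∧
      (3 ≤ p.1 → splitKey (joinKey ((splitKey q.1).take (p.1 - 1).toNat)) =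
        (splitKey q.1).take (p.1 - 1).toNat) := by
    intro p hp h2 hn q hq
    have hkey := (h3 p.1 ((PySem.List.mem_pyRange_one).2 ⟨h2, by omega⟩)).2
    have hsome := dGet?_isSome_of_mem_keys t (p.1 - 1) hkey
    cases hdg : dGet? t (p.1 - 1) with
    | none => rw [hdg] at hsome; simp at hsome
    | some d =>
      exact h4m p hp h2 hn q hq (p.1 - 1, d) (dGet?_mem hdg) rfl
  unfold Spec_getTypeAdd_FewNerd
  rw [A_char t hnd hin h4, B_char t hnd hin]
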